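-- pv_equiv track=rewrite | github.com/mirusu400/Story-of-seasons-Trio-of-Towns-Fan-Translation | tool_xbb.py | check_encoding
-- ===== SOURCE A (Python) =====
-- def check_encoding(btext):
--     count = 0
--     for char in btext:
--         # In Python 3, iterating bytes yields integers
--         if char == 0x0:
--             count += 1
--             continue
--         if char >= 0x30 and char <= 0x7E:
--             continue
--         else:
--             return "utf-16"
--     if count >= 5:
--         return "utf-16"
--     return "ascii"
-- ===== SOURCE B (Python) =====
-- def check_encoding(btext):
--     allowed = {0} | set(range(0x30, 0x7F))
--     if set(btext) - allowed:
--         return "utf-16"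
--     return "utf-16" if btext.count(0) >= 5 else "ascii"
-- ===== Notes on version B (the rewrite author's own statement) =====
-- stated objective: alternative
-- what changed: Replaced A's single early-returning per-byte loop with a running zero counter by set algebra: build the set of distinct bytes once, test validity as a set difference against a precomputed allowed set, then decide by list.count(0).
import Mathlib
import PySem

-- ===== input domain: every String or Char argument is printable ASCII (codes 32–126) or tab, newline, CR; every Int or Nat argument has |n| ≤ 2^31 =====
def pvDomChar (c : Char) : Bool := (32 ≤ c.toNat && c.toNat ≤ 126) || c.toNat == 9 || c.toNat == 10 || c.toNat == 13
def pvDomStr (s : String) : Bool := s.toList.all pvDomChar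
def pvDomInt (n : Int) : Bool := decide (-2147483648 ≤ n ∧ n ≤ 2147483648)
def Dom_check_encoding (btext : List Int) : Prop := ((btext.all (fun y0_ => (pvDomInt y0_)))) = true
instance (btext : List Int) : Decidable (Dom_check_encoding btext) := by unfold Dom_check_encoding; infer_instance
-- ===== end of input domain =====

-- B replaces A's early-returning per-byte loop (running zero counter) by set algebra:
-- set of distinct bytes, set difference against a precomputed allowed set, then list.count(0).

-- ===== PORT A =====
-- A's loop: running zero counter, early return on an invalid byte
def check_encoding_loop : List Int → Int → String
  | [], count => if count ≥ 5 then "utf-16" else "ascii"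
  | c :: rest, count =>
      if c = 0 then check_encoding_loop rest (count + 1)
      else if c ≥ 0x30 ∧ c ≤ 0x7E then check_encoding_loop rest count
      else "utf-16"

def check_encoding (btext : List Int) : String := check_encoding_loop btext 0

-- ===== PORT B =====
def check_encoding_alt (btext : List Int) : String :=
  let allowed : PySem.Set Int :=
    PySem.Set.union (PySem.Set.ofList [(0 : Int)]) (PySem.List.pyRange 0x30 0x7F 1)
  if PySem.Set.diff (PySem.Set.ofList btext) allowed ≠ PySem.Set.empty then "utf-16"
  else if (PySem.List.count btext 0 : Int) ≥ 5 then "utf-16"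
  else "ascii"

-- ===== PRECONDITION & SPEC =====
def Spec_check_encoding (btext : List Int) (out : String) : Prop := out = check_encoding_alt btext
instance (btext : List Int) (out : String) : Decidable (Spec_check_encoding btext out) := by unfold Spec_check_encoding; infer_instance

-- ===== CLAIM (what is proved, stated in full; the proofs are below) =====
def Claim_equal_check_encoding : Prop := ∀ (btext : List Int), Dom_check_encoding btext → Spec_check_encoding btext (check_encoding btext)

-- ===== LEMMAS AND PROOFS =====

-- ===== VERDICT (by name: the statement is the Claim_ definition above) =====
theorem diff_ne_empty_iff (btext : List Int) :
    (PySem.Set.diff (PySem.Set.ofList btext)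
      (PySem.Set.union (PySem.Set.ofList [(0 : Int)]) (PySem.List.pyRange 0x30 0x7F 1)) ≠ PySem.Set.empty)
    ↔ ∃ b ∈ btext, b ≠ 0 ∧ ¬(0x30 ≤ b ∧ b ≤ 0x7E) := by
  constructor
  · intro h
    obtain ⟨x, hx⟩ := List.exists_mem_of_ne_nil _ h
    rw [PySem.Set.mem_diff, PySem.Set.mem_union, PySem.Set.mem_ofList, PySem.Set.mem_ofList] at hx
    refine ⟨x, hx.1, ?_, ?_⟩
    · intro h0; exact hx.2 (Or.inl (by simp [h0]))
    · intro hr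
      exact hx.2 (Or.inr (by rw [PySem.List.mem_pyRange_iff_of_pos (by norm_num)]; omega))
  · rintro ⟨b, hb, h0, hr⟩ hnil
    have : b ∈ PySem.Set.diff (PySem.Set.ofList btext)
        (PySem.Set.union (PySem.Set.ofList [(0 : Int)]) (PySem.List.pyRange 0x30 0x7F 1)) := by
      rw [PySem.Set.mem_diff, PySem.Set.mem_union, PySem.Set.mem_ofList, PySem.Set.mem_ofList]
      refine ⟨hb, ?_⟩
      rintro (h | h)
      · simp at h; exact h0 h
      · rw [PySem.List.mem_pyRange_iff_of_pos (by norm_num)] at h; omega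
    rw [hnil] at this
    exact absurd this (List.not_mem_nil)

theorem check_encoding_loop_eq (l : List Int) (count : Int) :
    check_encoding_loop l count =
      if ∃ b ∈ l, b ≠ 0 ∧ ¬(0x30 ≤ b ∧ b ≤ 0x7E) then "utf-16"
      else if count + (l.count 0 : Int) ≥ 5 then "utf-16"
      else "ascii" := by
  induction l generalizing count with
  | nil => simp [check_encoding_loop]
  | cons c rest ih =>
      by_cases hc : c = 0
      · subst hc
        simp [check_encoding_loop, ih]
        split_ifs <;> push_cast at * <;> first | rfl | omega
      · by_cases hr : (0x30:Int) ≤ c ∧ c ≤ 0x7E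
        · simp [check_encoding_loop, hc, hr, ih, not_lt.mpr hr.2]
        · simp only [check_encoding_loop, hc, hr, if_false]
          rw [if_pos ⟨c, List.mem_cons_self, hc, hr⟩]

-- ===== VERDICT (by name: the statement is the Claim_ definition above) =====
theorem check_encoding_spec : Claim_equal_check_encoding := by
  intro btext _
  unfold Spec_check_encoding check_encoding check_encoding_alt
  rw [check_encoding_loop_eq]
  simp only [PySem.List.count_eq]
  by_cases hE : ∃ b ∈ btext, b ≠ 0 ∧ ¬(0x30 ≤ b ∧ b ≤ 0x7E)
  · rw [if_pos hE, if_pos ((diff_ne_empty_iff btext).mpr hE)]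
  · rw [if_neg hE, if_neg (fun h => hE ((diff_ne_empty_iff btext).mp h))]
    split_ifs <;> first | rfl | omega
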